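-- pv_equiv track=rewrite | github.com/sapna-nimkar/Programming | Python/Programming/string_programs.py | string_update
-- ===== SOURCE A (Python) =====
-- def string_update(sentence):
--     #my_str = sentence.replace(" ", "")
--     my_set = set()
--     result = ''
--     for letter in sentence:
--         if letter == " ":
--             result += letter
--             continue
--         if letter not in my_set:
--             my_set.add(letter)
--             result += letter
--         else:
--             result += "&"
--     return result
-- ===== SOURCE B (Python) =====
-- def string_update(sentence):
--     # Eager forward erasure: each kept character immediately erases its later
--     # duplicates in the mutable char array; positions already erased to '&' are skipped.
--     chars = list(sentence)
--     for i, c in enumerate(chars):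
--         if c != ' ' and c != '&':
--             for j in range(i + 1, len(chars)):
--                 if chars[j] == c:
--                     chars[j] = '&'
--     return ''.join(chars)
-- ===== Notes on version B (the rewrite author's own statement) =====
-- stated objective: alternative
-- what changed: Replaces A's seen-set single pass by eager forward erasure over a mutable char array: each character that is not a space and not already erased to '&' immediately rewrites all its later duplicates to '&', so no membership structure is ever maintained.
import Mathlib
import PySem

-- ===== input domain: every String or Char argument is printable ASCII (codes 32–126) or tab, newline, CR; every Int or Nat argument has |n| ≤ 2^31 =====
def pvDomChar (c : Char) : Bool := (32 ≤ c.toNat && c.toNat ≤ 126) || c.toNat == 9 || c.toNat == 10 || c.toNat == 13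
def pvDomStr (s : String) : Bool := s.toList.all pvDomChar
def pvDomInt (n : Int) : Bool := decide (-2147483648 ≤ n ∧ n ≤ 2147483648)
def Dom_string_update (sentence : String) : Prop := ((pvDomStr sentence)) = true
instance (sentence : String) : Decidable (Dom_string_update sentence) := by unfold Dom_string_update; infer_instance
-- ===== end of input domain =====

-- ===== PORT A =====
-- B: eager forward erasure instead of A's seen-set pass (alternative algorithm, not claimed faster).
-- one foldl step = one iteration of A's for-loop, carrying (my_set, result)
def pvAStep (st : PySem.Set Char × List Char) (letter : Char) : PySem.Set Char × List Char :=
  if letter = ' ' then (st.1, st.2 ++ [letter])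
  else if PySem.Set.contains st.1 letter = false then
    (PySem.Set.add st.1 letter, st.2 ++ [letter])
  else (st.1, st.2 ++ ['&'])

def string_update (sentence : String) : String :=
  String.ofList (sentence.toList.foldl pvAStep (PySem.Set.empty, [])).2

-- ===== PORT B =====
-- B's outer loop, as recursion on the (already partially rewritten) suffix: position i keeps
-- its current character c; if c is neither ' ' nor '&', the inner j-loop rewrites every later
-- occurrence of c in the tail to '&' (the map is exactly that in-place index loop).
def pvBgo : List Char → List Char
  | [] => []
  | c :: rest =>
      c :: pvBgo (if c = ' ' ∨ c = '&' then rest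
                  else rest.map (fun x => if x = c then '&' else x))
  termination_by l => l.length
  decreasing_by split <;> simp

def string_update_alt (sentence : String) : String :=
  String.ofList (pvBgo sentence.toList)

-- ===== PRECONDITION & SPEC =====
def Spec_string_update (sentence : String) (out : String) : Prop := out = string_update_alt sentence
instance (sentence : String) (out : String) : Decidable (Spec_string_update sentence out) := by unfold Spec_string_update; infer_instance

-- ===== CLAIM (what is proved, stated in full; the proofs are below) =====
def Claim_equal_string_update : Prop := ∀ (sentence : String), Dom_string_update sentence → Spec_string_update sentence (string_update sentence)

-- ===== LEMMAS AND PROOFS =====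

-- A's loop from set S  =  B's recursion on the list in which the members of S are already
-- erased to '&' (S never contains a space)
lemma pv_loop : ∀ (l : List Char) (S : PySem.Set Char) (acc : List Char),
    ' ' ∉ S →
    (l.foldl pvAStep (S, acc)).2
      = acc ++ pvBgo (l.map (fun x => if x ∈ S then '&' else x)) := by
  intro l
  induction l with
  | nil => intro S acc _; simp [pvBgo]
  | cons c rest ih =>
    intro S acc hS
    by_cases hsp : c = ' '
    · subst hsp
      rw [List.foldl_cons, show pvAStep (S, acc) ' ' = (S, acc ++ [' ']) by simp [pvAStep]]
      rw [List.map_cons, if_neg hS, pvBgo, if_pos (Or.inl rfl)]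
      simpa using ih S (acc ++ [' ']) hS
    · by_cases hmem : c ∈ S
      · -- already seen: A emits '&' and keeps S; B's mapped head is '&' and is skipped
        rw [List.foldl_cons,
            show pvAStep (S, acc) c = (S, acc ++ ['&']) by simp [pvAStep, hsp, hmem]]
        rw [List.map_cons, if_pos hmem, pvBgo, if_pos (Or.inr rfl)]
        simpa using ih S (acc ++ ['&']) hS
      · -- first occurrence: A adds c to S and emits c; B keeps c and erases it in the tail
        have hS' : ' ' ∉ PySem.Set.add S c := by
          intro h
          rcases (PySem.Set.mem_add S c ' ').mp h with h | h
          · exact hS h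
          · exact hsp h.symm
        rw [List.foldl_cons,
            show pvAStep (S, acc) c = (PySem.Set.add S c, acc ++ [c]) by
              simp [pvAStep, hsp, hmem]]
        rw [List.map_cons, if_neg hmem, pvBgo]
        by_cases hamp : c = '&'
        · -- erasing '&' in the tail is a no-op on the mapped tail, and B skips it anyway
          subst hamp
          rw [if_pos (Or.inr rfl)]
          have heq : rest.map (fun x => if x ∈ S then '&' else x)
              = rest.map (fun x => if x ∈ PySem.Set.add S '&' then '&' else x) := by
            apply List.map_congr_left
            intro x _
            by_cases hx : x ∈ S
            · simp [PySem.Set.mem_add, hx]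
            · by_cases hxc : x = '&' <;> simp [PySem.Set.mem_add, hx, hxc]
          rw [heq]
          simpa using ih (PySem.Set.add S '&') (acc ++ ['&']) hS'
        · rw [if_neg (by simp [hsp, hamp])]
          have heq : (rest.map (fun x => if x ∈ S then '&' else x)).map
                (fun x => if x = c then '&' else x)
              = rest.map (fun x => if x ∈ PySem.Set.add S c then '&' else x) := by
            rw [List.map_map]
            apply List.map_congr_left
            intro x _
            by_cases hx : x ∈ S
            · simp [PySem.Set.mem_add, hx]
            · by_cases hxc : x = c
              · subst hxc; simp [PySem.Set.mem_add, hx]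
              · simp [PySem.Set.mem_add, hx, hxc]
          rw [heq]
          simpa using ih (PySem.Set.add S c) (acc ++ [c]) hS'

-- ===== VERDICT (by name: the statement is the Claim_ definition above) =====
theorem string_update_spec : Claim_equal_string_update := by
  intro sentence _
  unfold Spec_string_update string_update string_update_alt
  rw [pv_loop sentence.toList PySem.Set.empty [] (by simp [PySem.Set.empty])]
  simp [PySem.Set.empty]
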